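-- pv_equiv track=rewrite | github.com/pypi-data/pypi-mirror-135 | packages/absfuyu/absfuyu-0.1.2-py3-none-any.whl/absfuyu/string.py | strHex
-- ===== SOURCE A (Python) =====
-- def strHex(your_string,output_opt="x"):
--     output_option = {
--         "normal":0,
--         "x":1
--     }
--     # normal: normal hex string | x: hex string in the form of \x
--
--     outopt = output_option[output_opt]
--
--     byte_str = your_string.encode('utf-8')
--     hex_str = byte_str.hex()
--
--     if outopt == 0:
--         return hex_str
--
--     elif outopt == 1:
--         temp = []
--         str_len = len(hex_str)
--
--         for i in range(str_len):
--             if i % 2 == 0: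
--                 temp.append(f"\\x")
--             temp.append(hex_str[i])
--         return ''.join(temp)
-- ===== SOURCE B (Python) =====
-- def strHex(your_string, output_opt="x"):
--     output_option = {
--         "normal": 0,
--         "x": 1
--     }
--     outopt = output_option[output_opt]
--     byte_str = your_string.encode('utf-8')
--     if outopt == 0:
--         return byte_str.hex()
--     return ''.join(f"\\x{b:02x}" for b in byte_str)
-- ===== Notes on version B (the rewrite author's own statement) =====
-- stated objective: idiomatic
-- what changed: B formats each encoded byte directly as '\x%02x' in one pass over the bytes, instead of first building the full hex string and re-walking it character by character with an i%2 modulo check and a temp list.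
import Mathlib
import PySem

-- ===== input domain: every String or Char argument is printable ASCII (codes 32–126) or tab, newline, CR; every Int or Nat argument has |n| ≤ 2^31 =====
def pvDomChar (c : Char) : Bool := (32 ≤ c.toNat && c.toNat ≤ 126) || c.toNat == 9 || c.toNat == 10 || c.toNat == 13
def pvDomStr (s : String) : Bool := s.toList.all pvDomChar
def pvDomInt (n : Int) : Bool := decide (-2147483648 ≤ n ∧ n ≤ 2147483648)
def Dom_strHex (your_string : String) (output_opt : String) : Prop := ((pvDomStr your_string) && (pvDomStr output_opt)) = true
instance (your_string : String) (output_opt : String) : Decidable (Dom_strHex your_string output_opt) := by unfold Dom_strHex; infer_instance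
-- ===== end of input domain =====

-- B replaces A's walk over the hex string (with an i%2 modulo check) by a direct per-byte
-- "\x%02x" formatting pass over the encoded bytes; equivalence is on the return value.

-- shared helper: one hex digit (lowercase), and the two-digit hex of a byte; on the stated
-- ASCII domain a char's utf-8 encoding is its single code point, so this is exact on Dom.
def hexDigit (n : Nat) : Char := if n < 10 then Char.ofNat (48 + n) else Char.ofNat (87 + n)
def byteHex (c : Char) : List Char := [hexDigit (c.toNat / 16), hexDigit (c.toNat % 16)]
-- your_string.encode('utf-8').hex() as a char list (exact on Dom: ASCII only)
def encodeHex (s : String) : List Char := s.toList.flatMap byteHex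

-- ===== PORT A =====
def strHex (your_string : String) (output_opt : String) : String :=
  let output_option : PySem.Dict String Int := PySem.Dict.ofList [("normal", 0), ("x", 1)]
  -- output_option[output_opt] raises KeyError on other keys: excluded by Pre_strHex
  let outopt : Int := (PySem.Dict.get? output_option output_opt).getD 0
  let hex_str : List Char := encodeHex your_string
  if outopt == 0 then String.ofList hex_str
  else if outopt == 1 then
    let temp : List String :=
      (PySem.List.pyRange 0 (hex_str.length : Int) 1).foldl
        (fun temp i =>
          (if i % 2 == 0 then temp ++ ["\\x"] else temp)
            ++ [String.ofList [PySem.List.pyGetD hex_str i ' ']]) []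
    PySem.Str.join "" temp
  else ""  -- unreachable: outopt is 0 or 1

-- ===== PORT B =====
def strHex_alt (your_string : String) (output_opt : String) : String :=
  let output_option : PySem.Dict String Int := PySem.Dict.ofList [("normal", 0), ("x", 1)]
  let outopt : Int := (PySem.Dict.get? output_option output_opt).getD 0
  if outopt == 0 then String.ofList (encodeHex your_string)
  else PySem.Str.join "" (your_string.toList.map (fun c => String.ofList ('\\' :: 'x' :: byteHex c)))

-- ===== PRECONDITION & SPEC =====
-- Pre_ excludes exactly the keys on which A's dict lookup raises KeyError
def Pre_strHex (your_string : String) (output_opt : String) : Prop :=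
  output_opt = "normal" ∨ output_opt = "x"
instance (your_string : String) (output_opt : String) : Decidable (Pre_strHex your_string output_opt) := by unfold Pre_strHex; infer_instance
def pvWitness_strHex : String × String := ("Hi!", "x")

def Spec_strHex (your_string : String) (output_opt : String) (out : String) : Prop := out = strHex_alt your_string output_opt
instance (your_string : String) (output_opt : String) (out : String) : Decidable (Spec_strHex your_string output_opt out) := by unfold Spec_strHex; infer_instance

-- ===== CLAIM (what is proved, stated in full; the proofs are below) =====
def Claim_equal_strHex : Prop := ∀ (your_string : String) (output_opt : String), Dom_strHex your_string output_opt → Pre_strHex your_string output_opt → Spec_strHex your_string output_opt (strHex your_string output_opt)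

-- ===== LEMMAS AND PROOFS =====

theorem join_nil_flatten (parts : List (List Char)) :
    PySem.Chars.join [] parts = parts.flatten := by
  induction parts with
  | nil => simp [PySem.Chars.join_nil]
  | cons p rest ih =>
    cases rest with
    | nil => simp [PySem.Chars.join, List.intercalate]
    | cons q rest' =>
      rw [PySem.Chars.join_cons_cons, ih]
      simp

theorem loopA (cs : List Char) : ∀ (pre : List Char) (acc : List String), pre.length % 2 = 0 →
    (PySem.List.pyRange (pre.length : Int) ((pre.length : Int) + 2 * cs.length) 1).foldl
      (fun temp i =>
        (if i % 2 == 0 then temp ++ ["\\x"] else temp)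
          ++ [String.ofList [PySem.List.pyGetD (pre ++ cs.flatMap byteHex) i ' ']]) acc
    = acc ++ cs.flatMap
        (fun c => ["\\x", String.ofList [hexDigit (c.toNat / 16)], String.ofList [hexDigit (c.toNat % 16)]]) := by
  induction cs with
  | nil =>
    intro pre acc _
    rw [PySem.List.pyRange_one_eq_nil (by simp)]
    simp
  | cons c rest ih =>
    intro pre acc hpar
    rw [PySem.List.pyRange_one_cons (by simp)]
    rw [PySem.List.pyRange_one_cons (by simp; omega)]
    simp only [List.foldl_cons]
    have hc0 : ((pre.length : Int) % 2 == 0) = true := by simp; omega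
    have hc1 : (((pre.length : Int) + 1) % 2 == 0) = false := by simp; omega
    rw [hc0, hc1]
    simp only [if_true]
    have hget0 : PySem.List.pyGetD (pre ++ (c :: rest).flatMap byteHex) (pre.length : Int) ' '
        = hexDigit (c.toNat / 16) := by
      rw [PySem.List.pyGetD_natCast]
      simp [byteHex, List.flatMap_cons]
    have hget1 : PySem.List.pyGetD (pre ++ (c :: rest).flatMap byteHex) ((pre.length : Int) + 1) ' '
        = hexDigit (c.toNat % 16) := by
      have : ((pre.length : Int) + 1) = ((pre.length + 1 : Nat) : Int) := by push_cast; ring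
      rw [this, PySem.List.pyGetD_natCast]
      simp [byteHex, List.flatMap_cons, List.getD_eq_getElem?_getD]
    rw [hget0, hget1]
    have hs : pre ++ (c :: rest).flatMap byteHex
        = (pre ++ byteHex c) ++ rest.flatMap byteHex := by
      simp [List.flatMap_cons]
    have hlen' : (((pre ++ byteHex c).length : Int)) = (pre.length : Int) + 1 + 1 := by
      simp [byteHex]; omega
    have hub : (pre.length : Int) + 2 * ((c :: rest).length : Int)
        = (((pre ++ byteHex c).length : Int)) + 2 * (rest.length : Int) := by
      simp [byteHex]; omega
    rw [hs, ← hlen']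
    rw [show (pre.length : Int) + 2 * ((c :: rest).length : Int)
        = (((pre ++ byteHex c).length : Int)) + 2 * (rest.length : Int) from hub] at *
    rw [ih (pre ++ byteHex c) _ (by simp [byteHex]; omega)]
    simp [List.flatMap_cons]

theorem xcase (s : String) :
    PySem.Str.join ""
      ((PySem.List.pyRange 0 ((encodeHex s).length : Int) 1).foldl
        (fun temp i =>
          (if i % 2 == 0 then temp ++ ["\\x"] else temp)
            ++ [String.ofList [PySem.List.pyGetD (encodeHex s) i ' ']]) [])
    = PySem.Str.join "" (s.toList.map (fun c => String.ofList ('\\' :: 'x' :: byteHex c))) := by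
  have hlen : ((encodeHex s).length : Int) = 0 + 2 * (s.toList.length : Int) := by
    have : (s.toList.flatMap byteHex).length = 2 * s.toList.length := by
      induction s.toList with
      | nil => simp
      | cons c rest ih => simp [byteHex, ih]; omega
    simp [encodeHex, this]
  have h := loopA s.toList [] [] (by simp)
  simp only [List.length_nil, Nat.cast_zero, List.nil_append] at h
  rw [show (encodeHex s) = s.toList.flatMap byteHex from rfl] 
  rw [show ((s.toList.flatMap byteHex).length : Int) = 0 + 2 * (s.toList.length : Int) from hlen]
  rw [h]
  apply String.toList_inj.mp
  rw [PySem.Str.toList_join, PySem.Str.toList_join]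
  have hsep : ("" : String).toList = [] := by simp
  rw [hsep, join_nil_flatten, join_nil_flatten]
  induction s.toList with
  | nil => simp
  | cons c t ih => simp only [List.flatMap_cons, List.map_cons, List.map_append, List.flatten_append, List.flatten_cons, List.map_nil, List.flatten_nil, Function.comp, ih]; simp [byteHex]

-- ===== VERDICT (by name: the statement is the Claim_ definition above) =====
theorem strHex_spec : Claim_equal_strHex := by
  intro s opt _ hpre
  unfold Spec_strHex
  rcases hpre with h | h <;> subst h
  · rfl
  · show strHex s "x" = strHex_alt s "x"
    unfold strHex strHex_alt
    simp only []
    exact xcase s
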